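-- pv_equiv track=rewrite | github.com/invoice-group/Invoice | chinese_ocr/tool.py | is_check_num
-- ===== SOURCE A (Python) =====
-- def is_check_num(msg):
--     msg = msg.replace(' ', '')
--     cnt = 0
--     for c in msg:
--         if c >= '0' and c <= '9':
--             cnt += 1
--         else:
--             cnt = 0
--     return cnt == 8
-- ===== SOURCE B (Python) =====
-- def is_check_num(msg):
--     t = msg.replace(' ', '')
--     i = len(t)
--     while i > 0 and '0' <= t[i-1] <= '9':
--         i -= 1
--     return len(t) - i == 8
-- ===== Notes on version B (the rewrite author's own statement) =====
-- stated objective: faster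
-- what changed: Instead of a full forward pass that resets a counter at every non-digit, B scans backwards from the end of the space-stripped string and stops at the first non-digit, then compares the trailing-run length with 8.
import Mathlib
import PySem

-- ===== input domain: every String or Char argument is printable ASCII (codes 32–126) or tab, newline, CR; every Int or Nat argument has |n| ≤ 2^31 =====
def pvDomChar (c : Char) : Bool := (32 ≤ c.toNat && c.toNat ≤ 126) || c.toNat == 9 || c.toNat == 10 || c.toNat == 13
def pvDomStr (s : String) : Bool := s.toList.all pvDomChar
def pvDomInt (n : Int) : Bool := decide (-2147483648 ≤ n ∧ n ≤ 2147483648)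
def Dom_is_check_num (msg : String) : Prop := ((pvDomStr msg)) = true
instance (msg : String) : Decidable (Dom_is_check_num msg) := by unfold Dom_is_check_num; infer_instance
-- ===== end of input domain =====

-- B replaces A's full forward counter-resetting pass by a backwards scan that stops at the first non-digit (alternative decomposition, same result).


-- ===== PORT A =====
def is_check_num (msg : String) : Bool :=
  let m := PySem.Str.replace msg " " ""
  let cnt := m.toList.foldl (fun cnt c => if '0' ≤ c ∧ c ≤ '9' then cnt + 1 else 0) 0
  cnt == 8

-- ===== PORT B =====
-- the while loop `while i > 0 and '0' <= t[i-1] <= '9': i -= 1` as structural recursion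
-- over the reversed character list; its result is len(t) - i (the trailing digit-run length)
def pvTrailRun : List Char → Nat
  | [] => 0
  | c :: t => if '0' ≤ c ∧ c ≤ '9' then pvTrailRun t + 1 else 0

def is_check_num_alt (msg : String) : Bool :=
  let t := PySem.Str.replace msg " " ""
  pvTrailRun t.toList.reverse == 8

-- ===== PRECONDITION & SPEC =====
def Spec_is_check_num (msg : String) (out : Bool) : Prop := out = is_check_num_alt msg
instance (msg : String) (out : Bool) : Decidable (Spec_is_check_num msg out) := by unfold Spec_is_check_num; infer_instance

-- ===== CLAIM (what is proved, stated in full; the proofs are below) =====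
def Claim_equal_is_check_num : Prop := ∀ (msg : String), Dom_is_check_num msg → Spec_is_check_num msg (is_check_num msg)

-- ===== LEMMAS AND PROOFS =====
theorem pvTrailRun_append (l m : List Char) :
    pvTrailRun (l ++ m) =
      if l.all (fun c => decide ('0' ≤ c ∧ c ≤ '9')) then l.length + pvTrailRun m else pvTrailRun l := by
  induction l with
  | nil => simp
  | cons c t ih =>
    by_cases hc : '0' ≤ c ∧ c ≤ '9' <;>
      simp [pvTrailRun, ih, hc] <;> split_ifs <;> simp_all <;> omega

theorem pvFoldl_eq_trailRun (l : List Char) (cnt : Nat) :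
    l.foldl (fun cnt c => if '0' ≤ c ∧ c ≤ '9' then cnt + 1 else 0) cnt =
      if l.all (fun c => decide ('0' ≤ c ∧ c ≤ '9')) then cnt + l.length else pvTrailRun l.reverse := by
  induction l generalizing cnt with
  | nil => simp
  | cons c t ih =>
    by_cases hc : '0' ≤ c ∧ c ≤ '9' <;>
      simp [List.foldl_cons, ih, hc, pvTrailRun_append, pvTrailRun] <;>
      split_ifs <;> simp_all <;> omega

-- ===== VERDICT (by name: the statement is the Claim_ definition above) =====
theorem is_check_num_spec : Claim_equal_is_check_num := by
  have key : ∀ l : List Char,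
      ((l.foldl (fun cnt c => if '0' ≤ c ∧ c ≤ '9' then cnt + 1 else 0) 0) == 8)
        = (pvTrailRun l.reverse == 8) := by
    intro l
    rw [pvFoldl_eq_trailRun]
    split_ifs with h
    · have hlen : pvTrailRun l.reverse = l.length := by
        have h2 := pvTrailRun_append l.reverse []
        simp only [List.append_nil, List.all_reverse, h, if_true, pvTrailRun,
          List.length_reverse, Nat.add_zero] at h2
        exact h2
      simp [hlen]
    · rfl
  intro msg _
  unfold Spec_is_check_num is_check_num is_check_num_alt
  exact key ((PySem.Str.replace msg " " "").toList)
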